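-- pv_equiv track=rewrite | github.com/steadydoer/problem-solving | programmers/kakao/17683/pg17683.py | search_melody
-- ===== SOURCE A (Python) =====
-- def tokenizer(melody):
--     token = []
--     for c in melody:
--         if c == '#':
--             token.append(token.pop() + c)
--         else:
--             token.append(c)
--     return token
--
-- def search_melody(m, full_melodies):
--     match_melodies = []
--     match_title = '(None)'
--     m = tokenizer(m)
--     for title, melody in full_melodies.items():
--         if len(m) > len(melody):
--             continue
--         for i in range(0, len(melody) - len(m) + 1):
--             if m == melody[i:i + len(m)]:
--                 match_title = title
--                 match_melodies.append({'title': title, 'play_time': len(melody)})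
--                 break
--
--     if match_melodies:
--         match_melodies.sort(key=lambda info: info['play_time'], reverse=True)
--         match_title = match_melodies[0]['title']
--     return match_title
-- ===== SOURCE B (Python) =====
-- def _enc(tokens):
--     return '\0' + ''.join(t + '\0' for t in tokens)
--
-- def search_melody(m, full_melodies):
--     # tokenize in one pass: a '#' extends the current token, anything else starts a new one
--     toks, cur = [], ''
--     for c in m:
--         if c == '#' and cur:
--             cur += c
--         else:
--             if cur:
--                 toks.append(cur)
--             cur = c
--     if cur:
--         toks.append(cur)
--     # NUL-separated encoding turns token-list containment into a single substring test
--     pat = _enc(toks)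
--     best_title, best_len = '(None)', -1
--     for title, melody in full_melodies.items():
--         if len(melody) > best_len and pat in _enc(melody):
--             best_title, best_len = title, len(melody)
--     return best_title
-- ===== Notes on version B (the rewrite author's own statement) =====
-- stated objective: alternative
-- what changed: B tokenizes m in one accumulator pass (instead of A's append/pop list surgery), tests containment by encoding each token list as a NUL-separated string and using a single substring test instead of A's per-position slice comparison, and picks the longest matching melody with one best-tracking pass instead of A's collect-all-matches plus reverse stable sort.
import Mathlib
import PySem

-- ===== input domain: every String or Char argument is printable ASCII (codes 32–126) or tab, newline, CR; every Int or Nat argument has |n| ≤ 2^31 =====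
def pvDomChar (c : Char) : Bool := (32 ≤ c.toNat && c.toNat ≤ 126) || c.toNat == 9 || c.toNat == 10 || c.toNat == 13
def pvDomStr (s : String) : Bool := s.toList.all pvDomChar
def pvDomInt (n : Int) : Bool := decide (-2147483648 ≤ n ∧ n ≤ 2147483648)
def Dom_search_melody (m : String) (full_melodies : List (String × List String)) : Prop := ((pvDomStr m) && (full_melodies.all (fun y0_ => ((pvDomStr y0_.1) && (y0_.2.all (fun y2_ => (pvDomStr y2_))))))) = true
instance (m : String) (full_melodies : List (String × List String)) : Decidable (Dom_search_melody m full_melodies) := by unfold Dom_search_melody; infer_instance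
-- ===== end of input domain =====

-- B replaces A's collect-all-matches + reverse-stable-sort selection by a single best-tracking pass, and replaces
-- A's per-position token-slice comparison by one NUL-separator-encoded substring containment test ('pat in enc(melody)').

-- ===== PORT A =====
-- tokenizer(melody): token.pop() raises IndexError on an empty list; `none` marks exactly that
def pvTokenizerA : List Char → List String → Option (List String)
  | [], token => some token
  | c :: rest, token =>
    if c = '#' then
      match PySem.List.pop? token with
      | none => none
      | some (t, remaining) => pvTokenizerA rest (remaining ++ [t.push c])
    else pvTokenizerA rest (token ++ [String.ofList [c]])

-- the inner `for i in range(...)` loop with its break: first index whose window equals m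
def pvScanA (mt melody : List String) : Option Int :=
  (PySem.List.pyRange 0 ((melody.length : Int) - (mt.length : Int) + 1) 1).find?
    (fun i => mt == PySem.List.slice melody (some i) (some (i + (mt.length : Int))))

-- the body of search_melody after m has been tokenized
def pvSearchBody (mt : List String) (full_melodies : List (String × List String)) : String :=
  let st := (PySem.Dict.ofList full_melodies).items.foldl
    (fun (st : List (String × Int) × String) ti =>
      if mt.length > ti.2.length then st
      else
        match pvScanA mt ti.2 with
        | some _ => (st.1 ++ [(ti.1, (ti.2.length : Int))], ti.1)
        | none => st)
    ([], "(None)")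
  if st.1 = [] then st.2
  else
    match PySem.List.pyGet? (PySem.List.sorted st.1 (fun info => info.2) true) 0 with
    | some info => info.1
    | none => st.2   -- unreachable: the sorted list is nonempty

def search_melody (m : String) (full_melodies : List (String × List String)) : String :=
  match pvTokenizerA m.toList [] with
  | none => ""  -- IndexError inside tokenizer (m starts with '#'); excluded by Pre_search_melody
  | some mt => pvSearchBody mt full_melodies

-- ===== PORT B =====
-- B's one-pass tokenizer: cur is the token being built; a '#' extends it, anything else starts a new one
def pvGroupGo (cur : List Char) : List Char → List String
  | [] => if cur = [] then [] else [String.ofList cur]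
  | c :: rest =>
    if c = '#' ∧ cur ≠ [] then pvGroupGo (cur ++ [c]) rest
    else (if cur = [] then [] else [String.ofList cur]) ++ pvGroupGo [c] rest

def pvGroupB (cs : List Char) : List String := pvGroupGo [] cs

-- _enc(tokens): '\0' + ''.join(t + '\0' for t in tokens)
def pvEnc (tokens : List String) : List Char :=
  '\x00' :: tokens.flatMap (fun t => t.toList ++ ['\x00'])

def search_melody_alt (m : String) (full_melodies : List (String × List String)) : String :=
  let pat := pvEnc (pvGroupB m.toList)
  ((PySem.Dict.ofList full_melodies).items.foldl
    (fun (best : String × Int) ti =>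
      if ((ti.2.length : Int) > best.2) && PySem.Chars.isIn pat (pvEnc ti.2) then
        (ti.1, (ti.2.length : Int))
      else best)
    ("(None)", -1)).1

-- ===== PRECONDITION & SPEC =====
-- Pre_ excludes exactly the inputs where A raises IndexError: m starting with '#' (tokenizer pops from an empty list)
def Pre_search_melody (m : String) (full_melodies : List (String × List String)) : Prop :=
  m.toList.head? ≠ some '#'
instance (m : String) (full_melodies : List (String × List String)) : Decidable (Pre_search_melody m full_melodies) := by unfold Pre_search_melody; infer_instance
def pvWitness_search_melody : String × (List (String × List String)) :=
  ("ABC#", [("WORLD", ["A", "B", "C#", "D"]), ("HELLO", ["A", "B", "C"])])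

def Spec_search_melody (m : String) (full_melodies : List (String × List String)) (out : String) : Prop := out = search_melody_alt m full_melodies
instance (m : String) (full_melodies : List (String × List String)) (out : String) : Decidable (Spec_search_melody m full_melodies out) := by unfold Spec_search_melody; infer_instance

-- ===== CLAIM (what is proved, stated in full; the proofs are below) =====
def Claim_equal_search_melody : Prop := ∀ (m : String) (full_melodies : List (String × List String)), Dom_search_melody m full_melodies → Pre_search_melody m full_melodies → Spec_search_melody m full_melodies (search_melody m full_melodies)


theorem pop_append (acc : List String) (t : String) :
    PySem.List.pop? (acc ++ [t]) = some (t, acc) := by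
  have h1 : PySem.List.pyIdx? (acc.length + 1) (-1) = some acc.length := by
    simp [PySem.List.pyIdx?]
  have h2 : (acc ++ [t])[acc.length]? = some t := by
    simp
  have h3 : ∀ (l : List String), (l ++ [t]).eraseIdx l.length = l := by
    intro l
    induction l with
    | nil => rfl
    | cons a as ih => simpa [List.eraseIdx] using ih
  simp [PySem.List.pop?, h1, h2, h3]

theorem pvTokenizerA_go (cs : List Char) (acc : List String) (t : String) (h : t.toList ≠ []) :
    pvTokenizerA cs (acc ++ [t]) = some (acc ++ pvGroupGo t.toList cs) := by
  induction cs generalizing acc t with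
  | nil => simp [pvTokenizerA, pvGroupGo, h, String.ofList_toList]
  | cons c rest ih =>
    by_cases hc : c = '#'
    · subst hc
      have h' : (t.push '#').toList ≠ [] := by simp [String.toList_push]
      have hgo : pvGroupGo t.toList ('#' :: rest) = pvGroupGo (t.toList ++ ['#']) rest := by
        simp [pvGroupGo, h]
      simp only [pvTokenizerA, pop_append]
      rw [ih acc (t.push '#') h', String.toList_push, hgo]
      simp
    · have h' : (String.ofList [c]).toList ≠ [] := by simp
      have hgo : pvGroupGo t.toList (c :: rest) = t :: pvGroupGo [c] rest := by
        simp [pvGroupGo, hc, h, String.ofList_toList]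
      simp only [pvTokenizerA, if_neg hc]
      rw [show acc ++ [t] ++ [String.ofList [c]] = (acc ++ [t]) ++ [String.ofList [c]] by simp,
        ih (acc ++ [t]) (String.ofList [c]) h', String.toList_ofList, hgo]
      simp

theorem tokenizerA_eq_groupB (cs : List Char) (h : cs.head? ≠ some '#') :
    pvTokenizerA cs [] = some (pvGroupB cs) := by
  cases cs with
  | nil => simp [pvTokenizerA, pvGroupB, pvGroupGo]
  | cons c rest =>
    have hc : c ≠ '#' := by simpa using h
    have h' : (String.ofList [c]).toList ≠ [] := by simp
    have := pvTokenizerA_go rest [] (String.ofList [c]) h'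
    simp only [List.nil_append] at this
    have hgb : pvGroupB (c :: rest) = pvGroupGo [c] rest := by
      simp [pvGroupB, pvGroupGo, hc]
    rw [String.toList_ofList] at this
    simp only [pvTokenizerA, if_neg hc, List.nil_append, this, hgb]

theorem infix_iff_take_drop {α : Type} (l₁ l₂ : List α) :
    l₁ <:+: l₂ ↔ ∃ j : Nat, j + l₁.length ≤ l₂.length ∧ (l₂.drop j).take l₁.length = l₁ := by
  constructor
  · rintro ⟨s, t, rfl⟩
    refine ⟨s.length, by simp, ?_⟩
    rw [List.append_assoc, List.drop_left, List.take_left]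
  · rintro ⟨j, _, heq⟩
    rw [List.infix_iff_prefix_suffix]
    exact ⟨l₂.drop j, heq ▸ List.take_prefix _ _, List.drop_suffix _ _⟩

theorem scanA_iff (mt mel : List String) :
    ((!decide (mt.length > mel.length)) && (pvScanA mt mel).isSome) = true ↔ mt <:+: mel := by
  rw [infix_iff_take_drop]
  simp only [pvScanA, Bool.and_eq_true, Bool.not_eq_true', decide_eq_false_iff_not,
    List.find?_isSome, PySem.List.mem_pyRange_one, beq_iff_eq]
  constructor
  · rintro ⟨hkn, i, ⟨hi0, hi1⟩, heq⟩
    refine ⟨i.toNat, by omega, ?_⟩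
    have hcast : i = ((i.toNat : Nat) : Int) := by omega
    rw [hcast] at heq
    have hcast2 : ((i.toNat : Nat) : Int) + (mt.length : Int) =
        (((i.toNat + mt.length : Nat)) : Int) := by push_cast; ring
    rw [hcast2, PySem.List.slice_natCast] at heq
    have hn : i.toNat + mt.length - i.toNat = mt.length := by omega
    rw [hn] at heq
    exact heq.symm
  · rintro ⟨j, hle, heq⟩
    refine ⟨by omega, (j : Int), ⟨Int.natCast_nonneg j, by push_cast; omega⟩, ?_⟩
    have hcast2 : ((j : Nat) : Int) + (mt.length : Int) =
        (((j + mt.length : Nat)) : Int) := by push_cast; ring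
    have hn : j + mt.length - j = mt.length := by omega
    rw [hcast2, PySem.List.slice_natCast, hn, heq]

theorem pvEnc_cons (t : String) (ts : List String) :
    pvEnc (t :: ts) = '\x00' :: (t.toList ++ pvEnc ts) := by
  simp [pvEnc]

theorem enc_prefix_helper (t u X Y : List Char) (ht : '\x00' ∉ t) (hu : '\x00' ∉ u) :
    (t ++ '\x00' :: X <+: u ++ '\x00' :: Y) ↔ t = u ∧ X <+: Y := by
  induction t generalizing u with
  | nil =>
    cases u with
    | nil => simp [List.cons_prefix_cons]
    | cons v u' =>
      have hv : '\x00' ≠ v := by rintro rfl; exact hu (List.mem_cons_self ..)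
      simp [List.cons_prefix_cons, hv]
  | cons a t' ih =>
    have ha : a ≠ '\x00' := fun hh => ht (hh ▸ List.mem_cons_self ..)
    cases u with
    | nil => simp [List.cons_prefix_cons, ha]
    | cons v u' =>
      have ht' : '\x00' ∉ t' := fun hh => ht (List.mem_cons_of_mem _ hh)
      have hu' : '\x00' ∉ u' := fun hh => hu (List.mem_cons_of_mem _ hh)
      simp only [List.cons_append, List.cons_prefix_cons, ih u' ht' hu', List.cons.injEq]
      tauto

theorem enc_prefix_iff (toks mel : List String)
    (ht : ∀ s ∈ toks, '\x00' ∉ s.toList) (hm : ∀ s ∈ mel, '\x00' ∉ s.toList) :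
    (pvEnc toks <+: pvEnc mel) ↔ toks <+: mel := by
  induction toks generalizing mel with
  | nil =>
    cases mel with
    | nil => simp
    | cons u us => simp [pvEnc_cons, pvEnc, List.cons_prefix_cons]
  | cons t ts ih =>
    cases mel with
    | nil =>
      simp only [pvEnc_cons, pvEnc]
      constructor
      · intro hpre
        have := hpre.length_le
        simp [pvEnc] at this
      · intro hpre
        exact absurd hpre (by simp)
    | cons u us =>
      rw [pvEnc_cons, pvEnc_cons]
      rw [List.cons_prefix_cons, List.cons_prefix_cons]
      have htt : '\x00' ∉ t.toList := ht t (List.mem_cons_self ..)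
      have huu : '\x00' ∉ u.toList := hm u (List.mem_cons_self ..)
      have ht' : ∀ s ∈ ts, '\x00' ∉ s.toList := fun s hs => ht s (List.mem_cons_of_mem _ hs)
      have hm' : ∀ s ∈ us, '\x00' ∉ s.toList := fun s hs => hm s (List.mem_cons_of_mem _ hs)
      have hflat : (ts.flatMap (fun s => s.toList ++ ['\x00']) <+:
          us.flatMap (fun s => s.toList ++ ['\x00'])) ↔ ts <+: us := by
        rw [← ih us ht' hm']
        simp [pvEnc, List.cons_prefix_cons]
      have hEncT : pvEnc ts = '\x00' :: ts.flatMap (fun s => s.toList ++ ['\x00']) := rfl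
      have hEncU : pvEnc us = '\x00' :: us.flatMap (fun s => s.toList ++ ['\x00']) := rfl
      rw [hEncT, hEncU, enc_prefix_helper _ _ _ _ htt huu]
      simp [hflat, String.toList_inj]

theorem infix_skip (u : List Char) (W Z : List Char) (hu : '\x00' ∉ u)
    (hZ : Z.head? = some '\x00') : (Z <:+: u ++ W) ↔ Z <:+: W := by
  induction u with
  | nil => simp
  | cons v u' ih =>
    have hv : v ≠ '\x00' := fun hh => hu (hh ▸ List.mem_cons_self ..)
    have hu' : '\x00' ∉ u' := fun hh => hu (List.mem_cons_of_mem _ hh)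
    rw [List.cons_append, List.infix_cons_iff, ih hu']
    cases Z with
    | nil => simp at hZ
    | cons z Z' =>
      have hz : z = '\x00' := by simpa using hZ
      constructor
      · rintro (hpre | hinf)
        · rw [List.cons_prefix_cons] at hpre
          exact absurd (hz ▸ hpre.1).symm hv
        · exact hinf
      · intro hh; exact Or.inr hh

theorem enc_infix_iff (toks mel : List String)
    (ht : ∀ s ∈ toks, '\x00' ∉ s.toList) (hm : ∀ s ∈ mel, '\x00' ∉ s.toList) :
    (pvEnc toks <:+: pvEnc mel) ↔ toks <:+: mel := by
  induction mel with
  | nil =>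
    cases toks with
    | nil => simp
    | cons t ts =>
      constructor
      · intro hinf
        have := hinf.length_le
        simp [pvEnc_cons, pvEnc] at this
      · intro hinf
        have := hinf.length_le
        simp at this
  | cons u us ih =>
    have huu : '\x00' ∉ u.toList := hm u (List.mem_cons_self ..)
    have hm' : ∀ s ∈ us, '\x00' ∉ s.toList := fun s hs => hm s (List.mem_cons_of_mem _ hs)
    rw [pvEnc_cons, List.infix_cons_iff, ← pvEnc_cons]
    have hZ : (pvEnc toks).head? = some '\x00' := rfl
    rw [infix_skip u.toList (pvEnc us) (pvEnc toks) huu hZ]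
    rw [ih hm', enc_prefix_iff toks (u :: us) ht hm, List.infix_cons_iff]

theorem domStr_no_nul (s : String) (h : pvDomStr s = true) : '\x00' ∉ s.toList := by
  intro hmem
  simp only [pvDomStr, List.all_eq_true] at h
  have := h _ hmem
  simp [pvDomChar] at this

theorem groupGo_chars (cs : List Char) (cur : List Char) (t : String) (h : t ∈ pvGroupGo cur cs) :
    ∀ c ∈ t.toList, c ∈ cur ∨ c ∈ cs := by
  induction cs generalizing cur with
  | nil =>
    intro c hc
    by_cases hcur : cur = []
    · simp [pvGroupGo, hcur] at h
    · simp [pvGroupGo, hcur] at h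
      subst h
      simp at hc
      exact Or.inl hc
  | cons x rest ih =>
    intro c hc
    by_cases hx : x = '#' ∧ cur ≠ []
    · simp only [pvGroupGo, if_pos hx] at h
      rcases ih (cur ++ [x]) h c hc with h1 | h2
      · rcases List.mem_append.mp h1 with h3 | h4
        · exact Or.inl h3
        · simp at h4; exact Or.inr (h4 ▸ List.mem_cons_self ..)
      · exact Or.inr (List.mem_cons_of_mem _ h2)
    · simp only [pvGroupGo, if_neg hx, List.mem_append] at h
      rcases h with h1 | h2
      · by_cases hcur : cur = []
        · simp [hcur] at h1
        · simp [hcur] at h1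
          subst h1
          simp at hc
          exact Or.inl hc
      · rcases ih [x] h2 c hc with h3 | h4
        · simp at h3
          exact Or.inr (h3 ▸ List.mem_cons_self ..)
        · exact Or.inr (List.mem_cons_of_mem _ h4)

theorem items_ofList_prop {C : List String → Prop} (l : List (String × List String))
    (d : PySem.Dict String (List String)) (hd : ∀ p ∈ d.items, C p.2) (hl : ∀ p ∈ l, C p.2) :
    ∀ p ∈ (d.update l).items, C p.2 := by
  induction l generalizing d with
  | nil => simpa [PySem.Dict.update] using hd
  | cons q l' ih =>
    have hstep : d.update (q :: l') = (d.insert q.1 q.2).update l' := by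
      simp [PySem.Dict.update]
    rw [hstep]
    refine ih (d.insert q.1 q.2) ?_ (fun p hp => hl p (List.mem_cons_of_mem _ hp))
    intro p hp
    rcases (PySem.Dict.mem_items_insert _ _ _ _).mp hp with h1 | h2
    · exact h1 ▸ hl q (List.mem_cons_self ..)
    · exact hd p h2.1

theorem insertBy_head (x y : String × Int) (acc : List (String × Int))
    (h : acc.head? = some y) :
    (PySem.List.insertBy (fun a b => decide (b.2 < a.2)) x acc).head? =
      some (if x.2 > y.2 then x else y) := by
  cases acc with
  | nil => simp at h
  | cons z zs =>
    have hz : z = y := by simpa using h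
    subst hz
    simp only [PySem.List.insertBy]
    by_cases hb : z.2 < x.2
    · simp [hb, gt_iff_lt]
    · simp [hb, gt_iff_lt]

theorem sort_fold_head (M : List (String × Int)) (acc : List (String × Int)) (b : String × Int)
    (h : acc.head? = some b) :
    (M.foldl (fun a x => PySem.List.insertBy (fun a b => decide (b.2 < a.2)) x a) acc).head? =
      some (M.foldl (fun b x => if x.2 > b.2 then x else b) b) := by
  induction M generalizing acc b with
  | nil => simpa using h
  | cons x M' ih =>
    simp only [List.foldl_cons]
    exact ih _ _ (insertBy_head x b acc h)

theorem foldA_fst (Q : (String × List String) → Bool) (L : List (String × List String))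
    (acc0 : List (String × Int)) (t0 : String) :
    (L.foldl (fun st ti => if Q ti then (st.1 ++ [(ti.1, (ti.2.length : Int))], ti.1) else st)
      (acc0, t0)).1 = acc0 ++ (L.filter Q).map (fun ti => (ti.1, (ti.2.length : Int))) := by
  induction L generalizing acc0 t0 with
  | nil => simp
  | cons x L' ih =>
    by_cases hx : Q x
    · simp [List.filter_cons, hx, ih]
    · simp [List.filter_cons, hx, ih]

theorem foldA_snd (Q : (String × List String) → Bool) (L : List (String × List String))
    (acc0 : List (String × Int)) (t0 : String) (h : L.filter Q = []) :
    (L.foldl (fun st ti => if Q ti then (st.1 ++ [(ti.1, (ti.2.length : Int))], ti.1) else st)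
      (acc0, t0)).2 = t0 := by
  induction L generalizing acc0 t0 with
  | nil => simp
  | cons x L' ih =>
    rw [List.filter_cons] at h
    by_cases hx : Q x
    · simp [hx] at h
    · rw [if_neg (by simp [hx])] at h
      simp only [List.foldl_cons]
      rw [if_neg (by simp [hx])]
      exact ih acc0 t0 h

theorem selection_eq (Q : (String × List String) → Bool) (L : List (String × List String)) :
    (let st := L.foldl (fun st ti => if Q ti then (st.1 ++ [(ti.1, (ti.2.length : Int))], ti.1) else st)
        ([], "(None)");
      if st.1 = [] then st.2
      else
        match PySem.List.pyGet? (PySem.List.sorted st.1 (fun info => info.2) true) 0 with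
        | some info => info.1
        | none => st.2) =
    (L.foldl (fun best ti =>
        if ((ti.2.length : Int) > best.2) && Q ti then (ti.1, (ti.2.length : Int)) else best)
      ("(None)", -1)).1 := by
  have hB : L.foldl (fun best ti =>
        if ((ti.2.length : Int) > best.2) && Q ti then (ti.1, (ti.2.length : Int)) else best)
      ("(None)", -1) =
      ((L.filter Q).map (fun ti => (ti.1, (ti.2.length : Int)))).foldl
        (fun b x => if x.2 > b.2 then x else b) ("(None)", -1) := by
    rw [List.foldl_map, List.foldl_filter]
    refine PySem.List.foldl_congr_mem _ _ _ _ ?_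
    intro b ti _
    by_cases hq : Q ti <;> by_cases hlen : (ti.2.length : Int) > b.2 <;>
      simp [hq, hlen, gt_iff_lt]
  have hfst := foldA_fst Q L [] "(None)"
  simp only [List.nil_append] at hfst
  simp only [hB]
  rcases hM : (L.filter Q).map (fun ti => (ti.1, (ti.2.length : Int))) with _ | ⟨q, M'⟩
  · have hfilter : L.filter Q = [] := by
      rcases hFil : L.filter Q with _ | _
      · rfl
      · rw [hFil] at hM; simp at hM
    have hsnd := foldA_snd Q L [] "(None)" hfilter
    simp only [hfst, hM, List.foldl_nil]
    simp [hsnd]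
  · have hq2 : (0:Int) ≤ q.2 := by
      have : q ∈ (L.filter Q).map (fun ti => (ti.1, (ti.2.length : Int))) := by
        rw [hM]; exact List.mem_cons_self ..
      rcases List.mem_map.mp this with ⟨ti, _, rfl⟩
      positivity
    simp only [hfst, hM, List.foldl_cons]
    have hgq : (if q.2 > (-1:Int) then q else ("(None)", -1)) = q := by
      rw [if_pos (by omega)]
    have hsorted : PySem.List.sorted (q :: M') (fun info => info.2) true =
        List.foldl (fun a x => PySem.List.insertBy (fun a b => decide (b.2 < a.2)) x a) [q] M' := by
      simp [PySem.List.sorted, PySem.List.insertBy]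
    have hhead := sort_fold_head M' [q] q (by simp)
    rw [← hsorted] at hhead
    rcases hsor : PySem.List.sorted (q :: M') (fun info => info.2) true with _ | ⟨p0, rest0⟩
    · rw [hsor] at hhead; simp at hhead
    · rw [hsor] at hhead
      simp only [List.head?_cons, Option.some.injEq] at hhead
      simp only [if_neg (by simp : ¬ (q :: M' = []))]
      have hget : PySem.List.pyGet? (p0 :: rest0) 0 = some p0 := by
        simp [PySem.List.pyGet?, PySem.List.pyIdx?]
      rw [hget, hgq, hhead]

-- replace A's fold body by its Q-form (exact equality of step functions, no hypotheses needed)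
theorem bodyA_eq (mt : List String) (st : List (String × Int) × String) (ti : String × List String) :
    (if mt.length > ti.2.length then st
     else match pvScanA mt ti.2 with
          | some _ => (st.1 ++ [(ti.1, (ti.2.length : Int))], ti.1)
          | none => st) =
    (if decide (mt <:+: ti.2) then (st.1 ++ [(ti.1, (ti.2.length : Int))], ti.1) else st) := by
  by_cases hk : mt.length > ti.2.length
  · have : ¬ mt <:+: ti.2 := fun hh => absurd hh.length_le (by omega)
    simp [hk, this]
  · rcases hs : pvScanA mt ti.2 with _ | i
    · have : ¬ mt <:+: ti.2 := by
        rw [← scanA_iff]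
        simp [hk, hs]
      simp [hk, hs, this]
    · have : mt <:+: ti.2 := by
        rw [← scanA_iff]
        simp [hk, hs]
      simp [hk, hs, this]

-- ===== VERDICT (by name: the statement is the Claim_ definition above) =====
theorem search_melody_spec : Claim_equal_search_melody := by
  intro m full hdom hpre
  unfold Spec_search_melody search_melody search_melody_alt
  rw [tokenizerA_eq_groupB m.toList hpre]
  simp only []
  unfold pvSearchBody
  have hdom' := hdom
  simp only [Dom_search_melody, Bool.and_eq_true, List.all_eq_true] at hdom'
  obtain ⟨hm, hfull⟩ := hdom'
  -- the tokens of m contain no NUL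
  have hNoNulM : ∀ t ∈ pvGroupB m.toList, '\x00' ∉ t.toList := by
    intro t ht hmem
    rcases groupGo_chars m.toList [] t ht '\x00' hmem with h1 | h2
    · simp at h1
    · exact domStr_no_nul m hm h2
  -- no melody string reachable through the dict contains a NUL
  have hNoNulItems : ∀ p ∈ (PySem.Dict.ofList full).items, ∀ s ∈ p.2, '\x00' ∉ s.toList := by
    have hempty : ∀ p ∈ (PySem.Dict.empty : PySem.Dict String (List String)).items,
        ∀ s ∈ p.2, '\x00' ∉ s.toList := by
      intro p hp
      simp [PySem.Dict.empty, PySem.Dict.items] at hp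
    have := items_ofList_prop (C := fun mel => ∀ s ∈ mel, '\x00' ∉ s.toList) full
      PySem.Dict.empty hempty ?_
    · exact this
    · intro p hp s hs
      exact domStr_no_nul s ((hfull p hp).2 s hs)
  -- replace A's body by its Q-form
  have hA : (fun (st : List (String × Int) × String) (ti : String × List String) =>
      if (pvGroupB m.toList).length > ti.2.length then st
      else match pvScanA (pvGroupB m.toList) ti.2 with
           | some _ => (st.1 ++ [(ti.1, (ti.2.length : Int))], ti.1)
           | none => st) =
      (fun st ti => if decide (pvGroupB m.toList <:+: ti.2) then
          (st.1 ++ [(ti.1, (ti.2.length : Int))], ti.1) else st) :=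
    funext fun st => funext fun ti => bodyA_eq (pvGroupB m.toList) st ti
  rw [hA]
  -- replace B's containment test by the same Q
  have hBcong : (PySem.Dict.ofList full).items.foldl
      (fun (best : String × Int) ti =>
        if ((ti.2.length : Int) > best.2) &&
            PySem.Chars.isIn (pvEnc (pvGroupB m.toList)) (pvEnc ti.2) then
          (ti.1, (ti.2.length : Int))
        else best) ("(None)", -1) =
      (PySem.Dict.ofList full).items.foldl
      (fun best ti =>
        if ((ti.2.length : Int) > best.2) && decide (pvGroupB m.toList <:+: ti.2) then
          (ti.1, (ti.2.length : Int))
        else best) ("(None)", -1) := by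
    refine PySem.List.foldl_congr_mem _ _ _ _ ?_
    intro b ti hti
    have hiff : PySem.Chars.isIn (pvEnc (pvGroupB m.toList)) (pvEnc ti.2) =
        decide (pvGroupB m.toList <:+: ti.2) := by
      by_cases hinf : pvGroupB m.toList <:+: ti.2
      · have : pvEnc (pvGroupB m.toList) <:+: pvEnc ti.2 :=
          (enc_infix_iff _ _ hNoNulM (hNoNulItems ti hti)).mpr hinf
        simp [hinf, (PySem.Chars.isIn_iff_infix _ _).mpr this]
      · have : ¬ pvEnc (pvGroupB m.toList) <:+: pvEnc ti.2 := fun hh =>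
          hinf ((enc_infix_iff _ _ hNoNulM (hNoNulItems ti hti)).mp hh)
        have hfalse : PySem.Chars.isIn (pvEnc (pvGroupB m.toList)) (pvEnc ti.2) = false := by
          rcases hb : PySem.Chars.isIn (pvEnc (pvGroupB m.toList)) (pvEnc ti.2)
          · rfl
          · exact absurd ((PySem.Chars.isIn_iff_infix _ _).mp hb) this
        simp [hinf, hfalse]
    rw [hiff]
  rw [hBcong]
  exact selection_eq (fun ti => decide (pvGroupB m.toList <:+: ti.2)) (PySem.Dict.ofList full).items
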